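-- pv_equiv track=rewrite | github.com/ngocuong0105/dendron-wiki | vault/assets/files/Engineering/Code/Meta Cup/Past/problemA.py | compute
-- ===== SOURCE A (Python) =====
-- def compute(val,arr):
--     vowels = 'AEIOU'
--     seconds = 0
--     for ch in arr:
--         if ch == val: continue
--         if (ch in vowels) ^ (val in vowels):
--             seconds += 1
--         else:
--             seconds += 2
--     return seconds
-- ===== SOURCE B (Python) =====
-- def compute(val, arr):
--     vowels = 'AEIOU'
--     n = len(arr)
--     V = sum(ch in vowels for ch in arr)
--     E = sum(ch == val for ch in arr)
--     if val in vowels: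
--         return (n - V) + 2 * (V - E)
--     return V + 2 * ((n - V) - E)
-- ===== Notes on version B (the rewrite author's own statement) =====
-- stated objective: simpler
-- what changed: B replaces A's per-character branch-and-accumulate loop with aggregate counts (length, vowel count, equal-to-val count) and a two-case closed-form arithmetic expression.
import Mathlib
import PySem

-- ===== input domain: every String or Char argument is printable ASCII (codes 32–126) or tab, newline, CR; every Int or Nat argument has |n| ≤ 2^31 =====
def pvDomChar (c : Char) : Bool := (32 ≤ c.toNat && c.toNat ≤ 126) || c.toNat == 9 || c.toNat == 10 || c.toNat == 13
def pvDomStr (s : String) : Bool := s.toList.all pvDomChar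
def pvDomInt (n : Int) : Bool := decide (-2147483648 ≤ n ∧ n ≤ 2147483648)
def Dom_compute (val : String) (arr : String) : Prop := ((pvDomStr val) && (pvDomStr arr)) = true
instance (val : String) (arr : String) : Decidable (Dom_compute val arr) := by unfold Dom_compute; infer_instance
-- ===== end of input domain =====

-- B replaces A's per-character branch-and-accumulate loop with aggregate counts and a closed-form two-case expression; objective: simpler.

-- ===== PORT A =====
-- literal port of A: accumulate 0/1/2 per character with an XOR-ed vowel test
def compute (val : String) (arr : String) : Int :=
  let vowels := "AEIOU"
  arr.toList.foldl (fun seconds ch =>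
    if String.ofList [ch] == val then seconds
    else if Bool.xor (PySem.Str.isIn (String.ofList [ch]) vowels) (PySem.Str.isIn val vowels) then
      seconds + 1
    else seconds + 2) 0

-- ===== PORT B =====
-- port of Source B: n = len(arr), V = vowel count, E = equal-to-val count, then the closed form
def compute_alt (val : String) (arr : String) : Int :=
  let vowels := "AEIOU"
  let n : Int := PySem.Str.len arr
  let V : Int := (arr.toList.countP (fun ch => PySem.Str.isIn (String.ofList [ch]) vowels) : Nat)
  let E : Int := (arr.toList.countP (fun ch => String.ofList [ch] == val) : Nat)
  if PySem.Str.isIn val vowels then (n - V) + 2 * (V - E)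
  else V + 2 * ((n - V) - E)

-- ===== PRECONDITION & SPEC =====
def Spec_compute (val : String) (arr : String) (out : Int) : Prop := out = compute_alt val arr
instance (val : String) (arr : String) (out : Int) : Decidable (Spec_compute val arr out) := by unfold Spec_compute; infer_instance

-- ===== CLAIM (what is proved, stated in full; the proofs are below) =====
def Claim_equal_compute : Prop := ∀ (val : String) (arr : String), Dom_compute val arr → Spec_compute val arr (compute val arr)

-- ===== LEMMAS AND PROOFS =====

-- the accumulate loop equals the closed form, for any equality test p and vowel test v
-- agreeing on p-matching characters (p c → v c = vb)
theorem pv_core (p v : Char → Bool) (vb : Bool)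
    (hpv : ∀ c, p c = true → v c = vb) (cs : List Char) (acc : Int) :
    cs.foldl (fun s c => if p c then s
        else if Bool.xor (v c) vb then s + 1 else s + 2) acc
    = acc + (if vb then (((cs.length : Int)) - cs.countP v) + 2 * ((cs.countP v : Int) - cs.countP p)
        else (cs.countP v : Int) + 2 * (((cs.length : Int) - cs.countP v) - cs.countP p)) := by
  induction cs generalizing acc with
  | nil => simp
  | cons c cs ih =>
    simp only [List.foldl_cons, List.countP_cons, List.length_cons, ih]
    by_cases hp : p c = true
    · have hv := hpv c hp
      cases vb <;> simp [hp, hv] <;> ring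
    · have hp' : p c = false := by revert hp; cases p c <;> simp
      cases hvc : v c <;> cases vb <;>
        simp [hp', hvc, Bool.xor] <;> ring

-- ===== VERDICT (by name: the statement is the Claim_ definition above) =====
theorem compute_spec : Claim_equal_compute := by
  intro val arr _
  show compute val arr = compute_alt val arr
  unfold compute compute_alt
  simp only [PySem.Str.len]
  rw [pv_core (fun c => String.ofList [c] == val)
      (fun c => PySem.Str.isIn (String.ofList [c]) "AEIOU")
      (PySem.Str.isIn val "AEIOU")
      (fun c hc => by simp only [beq_iff_eq] at hc; dsimp only; rw [hc])]
  simp
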